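-- pv_equiv track=rewrite | github.com/feliP-P/Algo-3---2024-2c | borgfeli.py | borg
-- ===== SOURCE A (Python) =====
-- def borg(lista, i, b,w):
--     if i >= len(lista)-2:
--         return 0
--     elif lista[i] >= lista[w] and lista[i] <= lista[b]:
--         minim = (borg(lista, i+1, b, w) +1)
--     elif lista[i] > lista[b] and lista[i] >= lista[w]:
--         minim = min(borg(lista, i+1, i, w), borg(lista, i+1, b, w) + 1)
--     elif lista[i] < lista[w] and lista[i] <= lista[b]:
--         minim = min(borg(lista, i+1, b, i), borg(lista, i+1, b, w) + 1)
--     elif lista[i] < lista[w] and lista[i] > lista[b]: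
--         minim = min( borg(lista, i+1, i, w), borg(lista, i+1, b, i), borg(lista, i+1, b, w) + 1 )
--     return minim
-- ===== SOURCE B (Python) =====
-- def borg(lista, i, b, w):
--     n = len(lista)
--     memo = {}
--     def solve(i, b, w):
--         if i >= n - 2:
--             return 0
--         key = (i, b, w)
--         if key in memo:
--             return memo[key]
--         x = lista[i]
--         best = solve(i + 1, b, w) + 1
--         if x > lista[b]:
--             best = min(best, solve(i + 1, i, w))
--         if x < lista[w]:
--             best = min(best, solve(i + 1, b, i))
--         memo[key] = best
--         return best
--     return solve(i, b, w)
-- ===== Notes on version B (the rewrite author's own statement) =====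
-- stated objective: faster
-- what changed: B replaces A's exponential plain recursion by the same recurrence memoized on the (i,b,w) state with a dict, folding A's four-way branch chain into one base option plus two independent conditional options; intended as faster: the probe measured large speedups where both finish (e.g. 300x at n=256) but could not confirm at the largest sizes, where B's own cost (up to O(n^3) states, plus Python's recursion limit on deep inputs) also bites.
import Mathlib
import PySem

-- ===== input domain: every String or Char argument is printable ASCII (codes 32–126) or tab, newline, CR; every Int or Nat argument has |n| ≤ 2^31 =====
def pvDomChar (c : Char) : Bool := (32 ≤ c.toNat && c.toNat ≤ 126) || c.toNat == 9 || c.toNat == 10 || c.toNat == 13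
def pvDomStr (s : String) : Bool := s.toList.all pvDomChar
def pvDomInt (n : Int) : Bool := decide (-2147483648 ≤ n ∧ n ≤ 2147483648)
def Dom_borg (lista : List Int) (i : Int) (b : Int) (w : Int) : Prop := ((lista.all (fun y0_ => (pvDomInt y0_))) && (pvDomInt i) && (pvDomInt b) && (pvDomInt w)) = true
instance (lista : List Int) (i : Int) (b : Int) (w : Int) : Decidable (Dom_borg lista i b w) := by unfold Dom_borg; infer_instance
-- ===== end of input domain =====

-- B memoizes A's recurrence on the (i,b,w) state (dict threaded through the recursion), intended
-- as faster (unconfirmed in a timing run at the largest sizes: A times out there, and B's own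
-- state space / Python's recursion limit can bite too); return values agree wherever A returns.

-- shared indexing helper: lista[j] with Python negative-index semantics, totalized with 0
-- on the out-of-range states that Pre_borg excludes (Python raises IndexError there)
def getI (lista : List Int) (j : Int) : Int := (PySem.List.pyGet? lista j).getD 0

-- ===== PORT A =====
-- structural recursion on fuel = (len(lista) - 2 - i).toNat; fuel = 0 is exactly
-- Python's base test 'i >= len(lista) - 2', and each call at i+1 has fuel - 1
def borgF (lista : List Int) : Nat → Int → Int → Int → Int
  | 0, _i, _b, _w => 0
  | fuel + 1, i, b, w =>
    if getI lista i ≥ getI lista w ∧ getI lista i ≤ getI lista b then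
      borgF lista fuel (i + 1) b w + 1
    else if getI lista i > getI lista b ∧ getI lista i ≥ getI lista w then
      min (borgF lista fuel (i + 1) i w) (borgF lista fuel (i + 1) b w + 1)
    else if getI lista i < getI lista w ∧ getI lista i ≤ getI lista b then
      min (borgF lista fuel (i + 1) b i) (borgF lista fuel (i + 1) b w + 1)
    else  -- remaining case is exactly lista[i] < lista[w] and lista[i] > lista[b]
      min (min (borgF lista fuel (i + 1) i w) (borgF lista fuel (i + 1) b i))
        (borgF lista fuel (i + 1) b w + 1)

def borg (lista : List Int) (i : Int) (b : Int) (w : Int) : Int :=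
  borgF lista ((lista.length : Int) - 2 - i).toNat i b w

-- ===== PORT B =====
-- the inner 'solve' of Source B, same fuel pattern; the memo dict is threaded explicitly
def borgSolveF (lista : List Int) :
    Nat → Int → Int → Int → PySem.Dict (Int × Int × Int) Int →
      Int × PySem.Dict (Int × Int × Int) Int
  | 0, _i, _b, _w, memo => (0, memo)
  | fuel + 1, i, b, w, memo =>
    match memo.get? (i, b, w) with
    | some v => (v, memo)
    | none =>
      let x := getI lista i
      let p0 := borgSolveF lista fuel (i + 1) b w memo
      let p1 :=
        if x > getI lista b then
          let q := borgSolveF lista fuel (i + 1) i w p0.2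
          (min (p0.1 + 1) q.1, q.2)
        else (p0.1 + 1, p0.2)
      let p2 :=
        if x < getI lista w then
          let q := borgSolveF lista fuel (i + 1) b i p1.2
          (min p1.1 q.1, q.2)
        else p1
      (p2.1, p2.2.insert (i, b, w) p2.1)

def borg_alt (lista : List Int) (i : Int) (b : Int) (w : Int) : Int :=
  (borgSolveF lista ((lista.length : Int) - 2 - i).toNat i b w PySem.Dict.empty).1

-- ===== PRECONDITION & SPEC =====
-- Pre_ excludes exactly the inputs where A raises IndexError: i below -len, or b or w
-- outside [-len, len), reached while i < len-2 (the base case i >= len-2 never indexes).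
def Pre_borg (lista : List Int) (i : Int) (b : Int) (w : Int) : Prop :=
  (lista.length : Int) - 2 ≤ i ∨
    (-(lista.length : Int) ≤ i ∧ -(lista.length : Int) ≤ b ∧ b < (lista.length : Int) ∧
      -(lista.length : Int) ≤ w ∧ w < (lista.length : Int))
instance (lista : List Int) (i : Int) (b : Int) (w : Int) : Decidable (Pre_borg lista i b w) := by
  unfold Pre_borg; infer_instance

def pvWitness_borg : List Int × Int × Int × Int := ([5, 1, 3, 2, 4], 0, 0, 1)

def Spec_borg (lista : List Int) (i : Int) (b : Int) (w : Int) (out : Int) : Prop := out = borg_alt lista i b w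
instance (lista : List Int) (i : Int) (b : Int) (w : Int) (out : Int) : Decidable (Spec_borg lista i b w out) := by unfold Spec_borg; infer_instance

-- ===== CLAIM (what is proved, stated in full; the proofs are below) =====
def Claim_equal_borg : Prop := ∀ (lista : List Int) (i : Int) (b : Int) (w : Int), Dom_borg lista i b w → Pre_borg lista i b w → Spec_borg lista i b w (borg lista i b w)

-- ===== LEMMAS AND PROOFS =====

-- invariant: every memo entry stores the A-value of its state
def MemoInv (lista : List Int) (memo : PySem.Dict (Int × Int × Int) Int) : Prop :=
  ∀ i b w v, memo.get? (i, b, w) = some v → v = borg lista i b w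

lemma memoInv_empty (lista : List Int) : MemoInv lista PySem.Dict.empty := by
  intro i b w v h
  simp [PySem.Dict.get?_empty] at h

lemma memoInv_insert (lista : List Int) (memo : PySem.Dict (Int × Int × Int) Int)
    (i b w : Int) (v : Int) (hv : v = borg lista i b w) (hm : MemoInv lista memo) :
    MemoInv lista (memo.insert (i, b, w) v) := by
  intro i' b' w' u hu
  rw [PySem.Dict.get?_insert] at hu
  split at hu
  · next heq =>
    cases hu
    simp only [Prod.mk.injEq] at heq
    obtain ⟨rfl, rfl, rfl⟩ := heq
    exact hv
  · exact hm i' b' w' u hu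

lemma solve_correct (lista : List Int) :
    ∀ fuel (i b w : Int) memo, ((lista.length : Int) - 2 - i).toNat = fuel →
      MemoInv lista memo →
      (borgSolveF lista fuel i b w memo).1 = borg lista i b w ∧
        MemoInv lista (borgSolveF lista fuel i b w memo).2 := by
  intro fuel
  induction fuel with
  | zero =>
    intro i b w memo hn hinv
    rw [borgSolveF, borg, hn, borgF]
    exact ⟨rfl, hinv⟩
  | succ fuel ih =>
    intro i b w memo hn hinv
    have hf : ((lista.length : Int) - 2 - (i + 1)).toNat = fuel := by omega
    have hA : borg lista i b w = borgF lista (fuel + 1) i b w := by rw [borg, hn]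
    have hA0 : borg lista (i + 1) b w = borgF lista fuel (i + 1) b w := by rw [borg, hf]
    have hA1 : borg lista (i + 1) i w = borgF lista fuel (i + 1) i w := by rw [borg, hf]
    have hA2 : borg lista (i + 1) b i = borgF lista fuel (i + 1) b i := by rw [borg, hf]
    rw [borgSolveF]
    cases hget : memo.get? (i, b, w) with
    | some v =>
      have hv := hinv i b w v hget
      exact ⟨hv, hinv⟩
    | none =>
      obtain ⟨h0, hm0⟩ := ih (i + 1) b w memo hf hinv
      by_cases hb : getI lista i > getI lista b <;>
        by_cases hw : getI lista i < getI lista w <;>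
          simp only [hb, hw, if_true, if_false]
      · -- x > lb, x < lw
        obtain ⟨h1, hm1⟩ := ih (i + 1) i w (borgSolveF lista fuel (i + 1) b w memo).2 hf hm0
        obtain ⟨h2, hm2⟩ := ih (i + 1) b i
          (borgSolveF lista fuel (i + 1) i w (borgSolveF lista fuel (i + 1) b w memo).2).2 hf hm1
        have hval : min (min ((borgSolveF lista fuel (i+1) b w memo).1 + 1)
            ((borgSolveF lista fuel (i+1) i w (borgSolveF lista fuel (i+1) b w memo).2).1))
            ((borgSolveF lista fuel (i+1) b i
              (borgSolveF lista fuel (i+1) i w (borgSolveF lista fuel (i+1) b w memo).2).2).1)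
            = borg lista i b w := by
          rw [h0, h1, h2, hA, borgF, ← hA0, ← hA1, ← hA2]
          split_ifs <;> omega
        exact ⟨hval, memoInv_insert lista _ i b w _ hval hm2⟩
      · -- x > lb, x ≥ lw
        obtain ⟨h1, hm1⟩ := ih (i + 1) i w (borgSolveF lista fuel (i + 1) b w memo).2 hf hm0
        have hval : min ((borgSolveF lista fuel (i+1) b w memo).1 + 1)
            ((borgSolveF lista fuel (i+1) i w (borgSolveF lista fuel (i+1) b w memo).2).1)
            = borg lista i b w := by
          rw [h0, h1, hA, borgF, ← hA0, ← hA1]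
          split_ifs <;> omega
        exact ⟨hval, memoInv_insert lista _ i b w _ hval hm1⟩
      · -- x ≤ lb, x < lw
        obtain ⟨h2, hm2⟩ := ih (i + 1) b i (borgSolveF lista fuel (i + 1) b w memo).2 hf hm0
        have hval : min ((borgSolveF lista fuel (i+1) b w memo).1 + 1)
            ((borgSolveF lista fuel (i+1) b i (borgSolveF lista fuel (i+1) b w memo).2).1)
            = borg lista i b w := by
          rw [h0, h2, hA, borgF, ← hA0, ← hA2]
          split_ifs <;> omega
        exact ⟨hval, memoInv_insert lista _ i b w _ hval hm2⟩
      · -- x ≤ lb, x ≥ lw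
        have hval : (borgSolveF lista fuel (i+1) b w memo).1 + 1 = borg lista i b w := by
          rw [h0, hA, borgF, ← hA0]
          split_ifs <;> omega
        exact ⟨hval, memoInv_insert lista _ i b w _ hval hm0⟩

-- ===== VERDICT (by name: the statement is the Claim_ definition above) =====
theorem borg_spec : Claim_equal_borg := by
  intro lista i b w _hdom _hpre
  unfold Spec_borg borg_alt
  exact ((solve_correct lista _ i b w PySem.Dict.empty rfl (memoInv_empty lista)).1).symm
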